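-- pv_equiv track=rewrite | github.com/RahulARanger/My_Python_Book | basic rules/Regular Expressions/test1.py | add_mult
-- ===== SOURCE A (Python) =====
-- def single_factor(a,b):
--     if a==0:return False,1
--     if b%a==0:
--         return True,b//a
--     else:
--         return False,1
--
-- def add_mult(o,t):
--     factors_all=[]
--     for i in range(3):
--         curr=o[i]
--         to=t[i]
--         factorz=[]
--         for i in range(to-curr+1):
--             new_curr=curr+i
--             result,fac=single_factor(new_curr,to)
--             if result:
--                 factorz.append((fac,i))
--         factors_all+=list(set(factorz))
--     for i in factors_all:
--         if factors_all.count(i)>1:return True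
--     return False
-- ===== SOURCE B (Python) =====
-- def add_mult(o, t):
--     # scan each pair of groups once over their common offsets; no lists/sets, no quadratic count
--     for g in range(3):
--         for h in range(g + 1, 3):
--             cg, tg, ch, th = o[g], t[g], o[h], t[h]
--             hi = min(tg - cg, th - ch)
--             for off in range(hi + 1):
--                 d = cg + off
--                 e = ch + off
--                 if d != 0 and e != 0 and tg % d == 0 and th % e == 0 and tg // d == th // e:
--                     return True
--     return False
-- ===== Notes on version B (the rewrite author's own statement) =====
-- stated objective: alternative
-- what changed: B drops A's intermediate per-group pair lists, set dedup and quadratic .count duplicate scan: it scans each of the three pairs of ranges once over their common offsets and returns on the first shared (quotient, offset) pair.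
import Mathlib
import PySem

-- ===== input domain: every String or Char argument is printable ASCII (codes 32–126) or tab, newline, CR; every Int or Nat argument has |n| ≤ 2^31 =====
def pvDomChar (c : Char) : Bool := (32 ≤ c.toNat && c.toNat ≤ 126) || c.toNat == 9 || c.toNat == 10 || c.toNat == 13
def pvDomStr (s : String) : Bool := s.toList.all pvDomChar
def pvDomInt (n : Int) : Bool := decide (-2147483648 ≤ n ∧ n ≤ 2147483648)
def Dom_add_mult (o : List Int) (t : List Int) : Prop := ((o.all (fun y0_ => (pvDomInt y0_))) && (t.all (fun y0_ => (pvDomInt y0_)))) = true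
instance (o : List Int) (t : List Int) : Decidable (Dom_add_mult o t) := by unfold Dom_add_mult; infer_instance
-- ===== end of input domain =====

-- B replaces A's collect-then-count-duplicates scheme (per-group pair lists, set dedup,
-- quadratic .count scan) by a direct pairwise search: for each pair of the three groups it
-- scans the common offsets once and returns on the first shared (quotient, offset) pair.

-- ===== PORT A =====
def single_factor (a b : Int) : Bool × Int :=
  if a == 0 then (false, 1)
  else if PySem.Int.mod b a == 0 then (true, PySem.Int.floordiv b a)
  else (false, 1)

def add_mult (o : List Int) (t : List Int) : Bool :=
  let factors_all : List (Int × Int) :=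
    (PySem.List.pyRange 0 3 1).foldl (fun acc i =>
      let curr := PySem.List.pyGetD o i 0
      let T := PySem.List.pyGetD t i 0
      let factorz : List (Int × Int) :=
        (PySem.List.pyRange 0 (T - curr + 1) 1).foldl (fun fz j =>
          if (single_factor (curr + j) T).1 then
            fz ++ [((single_factor (curr + j) T).2, j)]
          else fz) []
      acc ++ PySem.Set.ofList factorz) []
  factors_all.any (fun x => factors_all.count x > 1)

-- ===== PORT B =====
def add_mult_alt (o : List Int) (t : List Int) : Bool :=
  (PySem.List.pyRange 0 3 1).any (fun g =>
    (PySem.List.pyRange (g + 1) 3 1).any (fun h =>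
      let cg := PySem.List.pyGetD o g 0
      let tg := PySem.List.pyGetD t g 0
      let ch := PySem.List.pyGetD o h 0
      let th := PySem.List.pyGetD t h 0
      let hi := min (tg - cg) (th - ch)
      (PySem.List.pyRange 0 (hi + 1) 1).any (fun off =>
        decide (cg + off ≠ 0) && decide (ch + off ≠ 0) &&
        (PySem.Int.mod tg (cg + off) == 0) && (PySem.Int.mod th (ch + off) == 0) &&
        (PySem.Int.floordiv tg (cg + off) == PySem.Int.floordiv th (ch + off)))))

-- ===== PRECONDITION & SPEC =====
-- Pre_ excludes exactly the inputs where A raises IndexError: a list o or t shorter than 3.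
def Pre_add_mult (o : List Int) (t : List Int) : Prop := 3 ≤ o.length ∧ 3 ≤ t.length
instance (o : List Int) (t : List Int) : Decidable (Pre_add_mult o t) := by unfold Pre_add_mult; infer_instance
def pvWitness_add_mult : List Int × List Int := ([2, 3, 4], [8, 9, 8])

def Spec_add_mult (o : List Int) (t : List Int) (out : Bool) : Prop := out = add_mult_alt o t
instance (o : List Int) (t : List Int) (out : Bool) : Decidable (Spec_add_mult o t out) := by unfold Spec_add_mult; infer_instance

-- ===== CLAIM (what is proved, stated in full; the proofs are below) =====
def Claim_equal_add_mult : Prop := ∀ (o : List Int) (t : List Int), Dom_add_mult o t → Pre_add_mult o t → Spec_add_mult o t (add_mult o t)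

-- ===== LEMMAS AND PROOFS =====

lemma sf_fst (a b : Int) :
    (single_factor a b).1 = (decide (a ≠ 0) && (PySem.Int.mod b a == 0)) := by
  unfold single_factor
  split_ifs with h1 h2 <;> simp_all

lemma sf_snd (a b : Int) (ha : a ≠ 0) (hm : PySem.Int.mod b a = 0) :
    (single_factor a b).2 = PySem.Int.floordiv b a := by
  unfold single_factor
  rw [if_neg (by simpa using ha), if_pos (by simpa using hm)]

-- membership in one group's factor list
def grpMem (curr T : Int) (x : Int × Int) : Prop :=
  0 ≤ x.2 ∧ x.2 < T - curr + 1 ∧ curr + x.2 ≠ 0 ∧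
    PySem.Int.mod T (curr + x.2) = 0 ∧ x.1 = PySem.Int.floordiv T (curr + x.2)

def grpList (curr T : Int) : List (Int × Int) :=
  (PySem.List.pyRange 0 (T - curr + 1) 1).foldl (fun fz j =>
    if (single_factor (curr + j) T).1 then
      fz ++ [((single_factor (curr + j) T).2, j)]
    else fz) []

lemma mem_grpList (curr T : Int) (x : Int × Int) :
    x ∈ grpList curr T ↔ grpMem curr T x := by
  obtain ⟨x1, x2⟩ := x
  unfold grpList grpMem
  rw [PySem.List.foldl_append_if (p := fun j => (single_factor (curr + j) T).1)
      (f := fun j => ((single_factor (curr + j) T).2, j))]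
  simp only [List.nil_append, List.mem_map, List.mem_filter, PySem.List.mem_pyRange_one]
  constructor
  · rintro ⟨j, ⟨⟨hj0, hj1⟩, hp⟩, hx⟩
    rw [sf_fst] at hp
    simp only [Bool.and_eq_true, decide_eq_true_eq, beq_iff_eq] at hp
    obtain ⟨ha, hm⟩ := hp
    obtain ⟨hx1, hx2⟩ := Prod.mk.injEq .. ▸ hx
    subst hx2
    refine ⟨hj0, hj1, ha, hm, ?_⟩
    simpa [sf_snd _ _ ha hm] using hx1.symm
  · rintro ⟨h0, h1, ha, hm, hf⟩
    refine ⟨x2, ⟨⟨h0, h1⟩, ?_⟩, ?_⟩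
    · rw [sf_fst]; simp [ha, hm]
    · rw [sf_snd _ _ ha hm, hf]

-- the three-group concatenation has a duplicate iff two groups share an element
lemma dup_iff_shared (L0 L1 L2 : List (Int × Int))
    (h0 : L0.Nodup) (h1 : L1.Nodup) (h2 : L2.Nodup) :
    ((L0 ++ L1 ++ L2).any fun x => (L0 ++ L1 ++ L2).count x > 1) = true ↔
      ∃ x, (x ∈ L0 ∧ x ∈ L1) ∨ (x ∈ L0 ∧ x ∈ L2) ∨ (x ∈ L1 ∧ x ∈ L2) := by
  rw [List.any_eq_true]
  have key : ∀ x : Int × Int,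
      ((x ∈ L0 ∧ x ∈ L1) ∨ (x ∈ L0 ∧ x ∈ L2) ∨ (x ∈ L1 ∧ x ∈ L2)) ↔
        (1 < L0.count x + L1.count x + L2.count x) := by
    intro x
    have c0 := List.nodup_iff_count_le_one.mp h0 x
    have c1 := List.nodup_iff_count_le_one.mp h1 x
    have c2 := List.nodup_iff_count_le_one.mp h2 x
    rw [← List.count_pos_iff (l := L0), ← List.count_pos_iff (l := L1),
        ← List.count_pos_iff (l := L2)]
    omega
  constructor
  · rintro ⟨x, hx, hc⟩
    simp only [List.count_append, decide_eq_true_eq] at hc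
    exact ⟨x, (key x).mpr hc⟩
  · rintro ⟨x, hx⟩
    have hc := (key x).mp hx
    refine ⟨x, ?_, by simp only [List.count_append, decide_eq_true_eq]; omega⟩
    simp only [List.mem_append]
    simp only [← List.count_pos_iff]
    omega

-- one pairwise scan of B is true iff the two groups share a (quotient, offset) pair
lemma pair_scan_iff (cg tg ch th : Int) :
    ((PySem.List.pyRange 0 (min (tg - cg) (th - ch) + 1) 1).any (fun off =>
        decide (cg + off ≠ 0) && decide (ch + off ≠ 0) &&
        (PySem.Int.mod tg (cg + off) == 0) && (PySem.Int.mod th (ch + off) == 0) &&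
        (PySem.Int.floordiv tg (cg + off) == PySem.Int.floordiv th (ch + off)))) = true ↔
      ∃ x, grpMem cg tg x ∧ grpMem ch th x := by
  rw [List.any_eq_true]
  constructor
  · rintro ⟨off, hmem, hc⟩
    rw [PySem.List.mem_pyRange_one] at hmem
    simp only [Bool.and_eq_true, decide_eq_true_eq, beq_iff_eq] at hc
    obtain ⟨⟨⟨⟨hd, he⟩, hmd⟩, hme⟩, hq⟩ := hc
    exact ⟨(PySem.Int.floordiv tg (cg + off), off),
      ⟨hmem.1, by omega, hd, hmd, rfl⟩, ⟨hmem.1, by omega, he, hme, hq⟩⟩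
  · rintro ⟨x, ⟨g0, g1, ga, gm, gf⟩, ⟨h0, h1, ha, hm, hf⟩⟩
    refine ⟨x.2, ?_, ?_⟩
    · rw [PySem.List.mem_pyRange_one]; omega
    · simp only [Bool.and_eq_true, decide_eq_true_eq, beq_iff_eq]
      exact ⟨⟨⟨⟨ga, ha⟩, gm⟩, hm⟩, by rw [← gf, ← hf]⟩

-- ===== VERDICT (by name: the statement is the Claim_ definition above) =====
theorem add_mult_spec : Claim_equal_add_mult := by
  intro o t _ _
  unfold Spec_add_mult add_mult add_mult_alt
  have hrange : PySem.List.pyRange 0 3 1 = [0, 1, 2] := by decide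
  have hr12 : PySem.List.pyRange (0 + 1) 3 1 = [1, 2] := by decide
  have hr2 : PySem.List.pyRange (1 + 1) 3 1 = [2] := by decide
  have hr3 : PySem.List.pyRange (2 + 1) 3 1 = [] := by decide
  rw [hrange]
  simp only [List.foldl_cons, List.foldl_nil, List.any_cons, List.any_nil, hr12, hr2, hr3]
  have hL : ∀ (c T : Int) (acc : List (Int × Int)),
      ((PySem.List.pyRange 0 (T - c + 1) 1).foldl (fun fz j =>
        if (single_factor (c + j) T).1 then fz ++ [((single_factor (c + j) T).2, j)] else fz)
        acc) = acc ++ grpList c T := by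
    intro c T acc
    unfold grpList
    rw [PySem.List.foldl_append_if, PySem.List.foldl_append_if]
    simp
  rw [Bool.eq_iff_iff]
  simp only [hL, List.nil_append]
  rw [dup_iff_shared _ _ _ (PySem.Set.nodup_ofList _) (PySem.Set.nodup_ofList _)
      (PySem.Set.nodup_ofList _)]
  simp only [PySem.Set.mem_ofList, mem_grpList, Bool.or_eq_true]
  rw [pair_scan_iff, pair_scan_iff, pair_scan_iff]
  simp only [exists_or, Bool.false_eq_true, or_false]
  rw [or_assoc]
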